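-- pv_equiv track=rewrite | github.com/mazumdarpinaki/computational_thinking | generator.py | allCombo
-- ===== SOURCE A (Python) =====
-- def allCombo(items):
--     n=len(items)
--     for i in range (3**n):
--         bag_1=[]
--         bag_2=[]
--         for j in range (n):
--             if (i//(3**j))%3 ==0:
--                 bag_1.append(items[j])
--             elif (i//(3**j))%3==1:
--                 bag_2.append(items[j])
--         yield bag_1,bag_2
-- ===== SOURCE B (Python) =====
-- def allCombo(items):
--     # Recursive descent: item 0 varies fastest, matching A's base-3 counter order.
--     if not items:
--         yield [], []
--         return
--     x = items[0]
--     for b1, b2 in allCombo(items[1:]):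
--         yield [x] + b1, b2
--         yield b1, [x] + b2
--         yield b1, b2
-- ===== Notes on version B (the rewrite author's own statement) =====
-- stated objective: alternative
-- what changed: Replaced the base-3 counter with nested digit extraction (i//3**j)%3 by a structural recursion on the item list that triples the sub-enumeration, yielding the same 3^n pairs in the same order.
import Mathlib
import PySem

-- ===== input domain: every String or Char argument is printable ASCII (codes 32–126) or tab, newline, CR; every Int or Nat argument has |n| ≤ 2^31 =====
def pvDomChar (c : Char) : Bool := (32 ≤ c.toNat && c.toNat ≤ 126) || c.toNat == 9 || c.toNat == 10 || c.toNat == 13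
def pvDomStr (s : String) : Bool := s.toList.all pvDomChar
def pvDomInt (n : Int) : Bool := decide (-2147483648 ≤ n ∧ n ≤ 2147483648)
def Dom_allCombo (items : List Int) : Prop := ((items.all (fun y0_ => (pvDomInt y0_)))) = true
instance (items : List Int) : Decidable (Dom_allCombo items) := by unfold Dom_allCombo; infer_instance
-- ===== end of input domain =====

-- B replaces A's base-3 counter decoding with a structural recursion on the list (alternative decomposition, same order of pairs).

-- ===== PORT A =====
-- literal transliteration: for i in range(3**n): inner loop over j in range(n) appending by digit (i//3**j)%3
def allCombo (items : List Int) : List (List Int × List Int) :=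
  (PySem.List.pyRange 0 ((3 ^ items.length : Nat) : Int) 1).map (fun i =>
    (PySem.List.pyRange 0 (items.length : Int) 1).foldl (fun bags j =>
      if PySem.Int.mod (PySem.Int.floordiv i ((3 : Int) ^ j.toNat)) 3 = 0 then
        (bags.1 ++ [PySem.List.pyGetD items j 0], bags.2)      -- index j always in range
      else if PySem.Int.mod (PySem.Int.floordiv i ((3 : Int) ^ j.toNat)) 3 = 1 then
        (bags.1, bags.2 ++ [PySem.List.pyGetD items j 0])
      else bags) ([], []))

-- ===== PORT B =====
def allCombo_alt (items : List Int) : List (List Int × List Int) :=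
  match items with
  | [] => [([], [])]
  | x :: rest =>
      (allCombo_alt rest).flatMap (fun p => [(x :: p.1, p.2), (p.1, x :: p.2), (p.1, p.2)])

-- ===== PRECONDITION & SPEC =====
def Spec_allCombo (items : List Int) (out : List (List Int × List Int)) : Prop := out = allCombo_alt items
instance (items : List Int) (out : List (List Int × List Int)) : Decidable (Spec_allCombo items out) := by unfold Spec_allCombo; infer_instance

-- ===== CLAIM (what is proved, stated in full; the proofs are below) =====
def Claim_equal_allCombo : Prop := ∀ (items : List Int), Dom_allCombo items → Spec_allCombo items (allCombo items)

-- ===== LEMMAS AND PROOFS =====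

-- Nat-arithmetic normal form of A's pair for counter k
def pvBags (items : List Int) (k : Nat) : List Int × List Int :=
  ((List.range items.length).flatMap (fun j => if k / 3 ^ j % 3 = 0 then [items.getD j 0] else []),
   (List.range items.length).flatMap (fun j => if k / 3 ^ j % 3 = 1 then [items.getD j 0] else []))

theorem pvFoldPair {α : Type} (l : List α) (f g : α → List Int) (a b : List Int) :
    l.foldl (fun (p : List Int × List Int) j => (p.1 ++ f j, p.2 ++ g j)) (a, b)
      = (a ++ l.flatMap f, b ++ l.flatMap g) := by
  induction l generalizing a b with
  | nil => simp
  | cons y ys ih => simp [List.foldl_cons, ih, List.flatMap_cons]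

theorem pvA_eq_map (items : List Int) :
    allCombo items = (List.range (3 ^ items.length)).map (pvBags items) := by
  unfold allCombo
  simp only [PySem.List.pyRange_zero_natCast]
  rw [List.map_map]
  apply List.map_congr_left
  intro k _
  have hstep : (fun (bags : List Int × List Int) (j : Int) =>
      if PySem.Int.mod (PySem.Int.floordiv ((k : Nat) : Int) ((3 : Int) ^ j.toNat)) 3 = 0 then
        (bags.1 ++ [PySem.List.pyGetD items j 0], bags.2)
      else if PySem.Int.mod (PySem.Int.floordiv ((k : Nat) : Int) ((3 : Int) ^ j.toNat)) 3 = 1 then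
        (bags.1, bags.2 ++ [PySem.List.pyGetD items j 0])
      else bags)
      = (fun (bags : List Int × List Int) (j : Int) =>
        (bags.1 ++ (if PySem.Int.mod (PySem.Int.floordiv ((k : Nat) : Int) ((3 : Int) ^ j.toNat)) 3 = 0 then [PySem.List.pyGetD items j 0] else []),
         bags.2 ++ (if PySem.Int.mod (PySem.Int.floordiv ((k : Nat) : Int) ((3 : Int) ^ j.toNat)) 3 = 1 then [PySem.List.pyGetD items j 0] else []))) := by
    funext bags j
    split_ifs <;> simp_all
    omega
  simp only [Function.comp_apply]
  rw [hstep, pvFoldPair]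
  rw [List.flatMap_map, List.flatMap_map]
  unfold pvBags
  refine Prod.ext ?_ ?_ <;> simp only [List.nil_append] <;>
    refine List.flatMap_congr ?_ <;> intro j hj <;>
    · have h3 : ((3:Int) ^ (((j : Nat) : Int).toNat)) = ((3 ^ j : Nat) : Int) := by push_cast; simp
      rw [h3, PySem.Int.floordiv_natCast, show (3:Int) = ((3:Nat):Int) by norm_num,
        PySem.Int.mod_natCast, PySem.List.pyGetD_natCast]
      simp only [Nat.cast_eq_zero, Nat.cast_eq_one]

theorem pvRange_mul3 (m : Nat) :
    List.range (3 * m) = (List.range m).flatMap (fun k => [3 * k, 3 * k + 1, 3 * k + 2]) := by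
  induction m with
  | zero => simp
  | succ m ih =>
      have h1 : 3 * (m + 1) = (3 * m + 1) + 1 + 1 := by ring
      rw [h1, List.range_succ, List.range_succ, List.range_succ, List.range_succ,
        List.flatMap_append, ← ih]
      simp

theorem pvBags_nil (k : Nat) : pvBags [] k = ([], []) := by simp [pvBags]

theorem pvBags_cons (x : Int) (rest : List Int) (k : Nat) :
    pvBags (x :: rest) k
      = ((if k % 3 = 0 then [x] else []) ++ (pvBags rest (k / 3)).1,
         (if k % 3 = 1 then [x] else []) ++ (pvBags rest (k / 3)).2) := by
  unfold pvBags
  simp only [List.length_cons, List.range_succ_eq_map, List.flatMap_cons, List.flatMap_map]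
  refine Prod.ext ?_ ?_ <;>
    · simp only [pow_zero, Nat.div_one, List.getD_cons_zero]
      congr 1
      refine List.flatMap_congr ?_
      intro j _
      have : k / 3 ^ (j + 1) = k / 3 / 3 ^ j := by
        rw [Nat.div_div_eq_div_mul, pow_succ']
      rw [this]; rfl

theorem pvMain (items : List Int) :
    (List.range (3 ^ items.length)).map (pvBags items) = allCombo_alt items := by
  induction items with
  | nil => simp [allCombo_alt, pvBags_nil]
  | cons x rest ih =>
      show (List.range (3 ^ (rest.length + 1))).map (pvBags (x :: rest)) = _
      rw [pow_succ', pvRange_mul3, List.map_flatMap, allCombo_alt, ← ih, List.flatMap_map]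
      refine List.flatMap_congr ?_
      intro k _
      have e0 : 3 * k % 3 = 0 := by omega
      have e1 : (3 * k + 1) % 3 = 1 := by omega
      have e2 : (3 * k + 2) % 3 = 2 := by omega
      have d0 : 3 * k / 3 = k := by omega
      have d1 : (3 * k + 1) / 3 = k := by omega
      have d2 : (3 * k + 2) / 3 = k := by omega
      simp [pvBags_cons, e0, e1, e2, d0, d1, d2]

-- ===== VERDICT (by name: the statement is the Claim_ definition above) =====
theorem allCombo_spec : Claim_equal_allCombo := by
  intro items _
  unfold Spec_allCombo
  rw [pvA_eq_map, pvMain]
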